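-- pv_equiv track=rewrite | github.com/sequentech/tally-methods | agora_tally/voting_systems/base_stv.py | parse_vote
-- ===== SOURCE A (Python) =====
-- def parse_vote(number, question, withdrawals=[]):
--     vote_str = str(number)
--     tab_size = len(str(len(question['answers']) + 2))
--
--
--     # fix add zeros
--     if len(vote_str) % tab_size != 0:
--         num_zeros = (tab_size - (len(vote_str) % tab_size)) % tab_size
--         vote_str = "0" * num_zeros + vote_str
--
--     ret = []
--     for i in range(int(len(vote_str) / tab_size)):
--         option = int(vote_str[i*tab_size: (i+1)*tab_size]) - 1
--
--         if option in withdrawals: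
--             continue
--
--         if option < 0:
--             # invalid vote
--             raise Exception()
--         if option < len(question['answers']):
--             option_str = question['answers'][option]['value']
--         if option >= len(question['answers']):
--             # invalid/blank vote
--             raise Exception()
--         ret.append(option_str)
--
--     return ret
-- ===== SOURCE B (Python) =====
-- def parse_vote(number, question, withdrawals=[]):
--     answers = question['answers']
--     tab = len(str(len(answers) + 2))
--     s = str(number)
--     s = s.zfill((len(s) + tab - 1) // tab * tab)
--     ret = []
--     while s:
--         option = int(s[-tab:]) - 1
--         s = s[:-tab]
--         if option not in withdrawals:
--             if option < 0 or option >= len(answers):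
--                 raise Exception()
--             ret.insert(0, answers[option]['value'])
--     return ret
-- ===== Notes on version B (the rewrite author's own statement) =====
-- stated objective: alternative
-- what changed: B replaces A's manual modular zero-padding and left-to-right index-sliced windows by a single zfill to the next multiple of tab_size and a while loop that consumes the string from the right, prepending each value (output built back-to-front).
import Mathlib
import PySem

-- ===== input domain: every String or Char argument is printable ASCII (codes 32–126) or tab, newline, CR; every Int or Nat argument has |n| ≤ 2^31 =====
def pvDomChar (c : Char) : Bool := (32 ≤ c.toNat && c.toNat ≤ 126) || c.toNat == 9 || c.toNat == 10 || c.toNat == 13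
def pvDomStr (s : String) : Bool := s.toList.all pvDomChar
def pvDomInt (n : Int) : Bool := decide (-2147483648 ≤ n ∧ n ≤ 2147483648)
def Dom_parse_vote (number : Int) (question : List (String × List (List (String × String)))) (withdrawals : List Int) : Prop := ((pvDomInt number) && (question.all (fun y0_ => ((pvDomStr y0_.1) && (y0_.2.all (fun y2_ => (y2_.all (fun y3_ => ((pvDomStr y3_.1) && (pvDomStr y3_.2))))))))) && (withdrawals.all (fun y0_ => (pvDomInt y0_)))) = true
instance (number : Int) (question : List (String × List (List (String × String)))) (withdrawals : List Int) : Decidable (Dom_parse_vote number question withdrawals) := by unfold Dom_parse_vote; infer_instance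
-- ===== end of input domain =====

-- B zfills str(number) once to a whole multiple of tab_size and consumes it from the right with a
-- while loop, prepending values (back-to-front), instead of A's modular zero-padding and
-- left-to-right index-sliced windows; same return value on Pre_, not faster, just a different shape.

-- ===== PORT A =====
-- question['answers'] is a dict lookup (KeyError outside Pre_); int(...) is PySem.Int.ofChars? on
-- the slice (its getD 0 default and the two 'raise Exception()' branches, which leave the
-- accumulator unchanged, are only reachable outside Pre_); int(len(vote_str)/tab_size) is exact
-- Nat division here because tab_size divides the padded length.
def parse_vote (number : Int) (question : List (String × List (List (String × String)))) (withdrawals : List Int) : List String :=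
  match (PySem.Dict.mk question).get? "answers" with
  | none => []  -- KeyError: question['answers'] (outside Pre_)
  | some answers =>
    let vote_str : List Char := (PySem.Int.toStr number).toList
    let tab_size : Nat := (PySem.Int.toStr ((answers.length : Int) + 2)).toList.length
    let vote_str : List Char :=
      if vote_str.length % tab_size ≠ 0 then
        List.replicate ((tab_size - vote_str.length % tab_size) % tab_size) '0' ++ vote_str
      else vote_str
    (PySem.List.pyRange 0 ((vote_str.length / tab_size : Nat) : Int) 1).foldl
      (fun ret i =>
        let option : Int :=
          (PySem.Int.ofChars? (PySem.List.slice vote_str (some (i * (tab_size : Int))) (some ((i + 1) * (tab_size : Int))))).getD 0 - 1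
        if withdrawals.contains option then ret
        else if option < 0 then ret  -- raise Exception() (outside Pre_)
        else if option < (answers.length : Int) then
          let option_str := (PySem.Dict.mk (PySem.List.pyGetD answers option [])).getD "value" ""
          ret ++ [option_str]
        else ret  -- raise Exception() (outside Pre_)
      ) []

-- ===== PORT B =====
-- the while loop of Source B: read the last tab_size chars, cut them off, prepend the value.
-- Terminates because s[:-tab] is strictly shorter than a nonempty s.
theorem pvSliceTo_lt (s : List Char) (t : Nat) (hs : s ≠ []) :
    (PySem.List.slice s none (some (-(t : Int)))).length < s.length := by
  cases t with
  | zero =>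
    have h0 : PySem.List.slice s none (some (-((0 : Nat) : Int))) = s.take 0 := by
      simpa using PySem.List.slice_to s (b := 0) (by omega)
    rw [h0]
    simp
    exact List.length_pos_iff.mpr hs
  | succ t =>
    rw [PySem.List.slice_to_neg_natCast s (t + 1) (by omega)]
    simp
    exact List.length_pos_iff.mpr hs

def pvBLoop (answers : List (List (String × String))) (tab : Nat) (withdrawals : List Int)
    (s : List Char) (ret : List String) : List String :=
  if hs : s = [] then ret
  else
    -- int(s[-tab:]): PySem.Int.ofChars? on the slice; getD 0 only reachable outside Pre_
    let option : Int := (PySem.Int.ofChars? (PySem.List.slice s (some (-(tab : Int))) none)).getD 0 - 1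
    let s' := PySem.List.slice s none (some (-(tab : Int)))
    if withdrawals.contains option then pvBLoop answers tab withdrawals s' ret
    else if option < 0 ∨ (answers.length : Int) ≤ option then ret  -- raise Exception() (outside Pre_)
    else pvBLoop answers tab withdrawals s'
      (((PySem.Dict.mk (PySem.List.pyGetD answers option [])).getD "value" "") :: ret)
termination_by s.length
decreasing_by all_goals exact pvSliceTo_lt s tab hs

def parse_vote_alt (number : Int) (question : List (String × List (List (String × String)))) (withdrawals : List Int) : List String :=
  match (PySem.Dict.mk question).get? "answers" with
  | none => []  -- KeyError (outside Pre_)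
  | some answers =>
    let tab : Nat := (PySem.Int.toStr ((answers.length : Int) + 2)).toList.length
    let s : List Char := (PySem.Int.toStr number).toList
    -- (len(s) + tab - 1) // tab * tab: Nat division is exact here, both operands nonnegative
    pvBLoop answers tab withdrawals
      (PySem.Chars.zfill s (((s.length + tab - 1) / tab * tab : Nat) : Int)) []

-- ===== PRECONDITION & SPEC =====
-- helpers used only by Pre_ (and the proofs): A's zero-padding and the tab-size decomposition
-- of the padded decimal string into its fixed-width fields.
def pvPadded (t : Nat) (s : List Char) : List Char :=
  if s.length % t ≠ 0 then List.replicate ((t - s.length % t) % t) '0' ++ s else s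

-- Pre_ excludes exactly the inputs where A raises — a question without an 'answers' key or an
-- answer without its 'value' key (KeyError), and fields whose option is neither withdrawn nor a
-- valid answer index (Exception) — plus negative numbers, where int() of a field containing the
-- '-' sign raises ValueError on almost all inputs and A's accept-or-raise behaviour is an
-- accident of how the sign happens to be chunked (B agrees with A wherever A returns there too,
-- but parsing success cannot be stated in closed form for them).
def Pre_parse_vote (number : Int) (question : List (String × List (List (String × String)))) (withdrawals : List Int) : Prop :=
  ((PySem.Dict.mk question).get? "answers").isSome ∧
  0 ≤ number ∧
  (∀ i ∈ List.range ((pvPadded (PySem.Int.toStr (((((PySem.Dict.mk question).get? "answers").getD []).length : Int) + 2)).toList.length (PySem.Int.toStr number).toList).length / (PySem.Int.toStr (((((PySem.Dict.mk question).get? "answers").getD []).length : Int) + 2)).toList.length),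
    (PySem.Int.ofChars? (((pvPadded (PySem.Int.toStr (((((PySem.Dict.mk question).get? "answers").getD []).length : Int) + 2)).toList.length (PySem.Int.toStr number).toList).drop (i * (PySem.Int.toStr (((((PySem.Dict.mk question).get? "answers").getD []).length : Int) + 2)).toList.length)).take (PySem.Int.toStr (((((PySem.Dict.mk question).get? "answers").getD []).length : Int) + 2)).toList.length)).getD 0 - 1 ∈ withdrawals ∨
    (1 ≤ (PySem.Int.ofChars? (((pvPadded (PySem.Int.toStr (((((PySem.Dict.mk question).get? "answers").getD []).length : Int) + 2)).toList.length (PySem.Int.toStr number).toList).drop (i * (PySem.Int.toStr (((((PySem.Dict.mk question).get? "answers").getD []).length : Int) + 2)).toList.length)).take (PySem.Int.toStr (((((PySem.Dict.mk question).get? "answers").getD []).length : Int) + 2)).toList.length)).getD 0 ∧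
     (PySem.Int.ofChars? (((pvPadded (PySem.Int.toStr (((((PySem.Dict.mk question).get? "answers").getD []).length : Int) + 2)).toList.length (PySem.Int.toStr number).toList).drop (i * (PySem.Int.toStr (((((PySem.Dict.mk question).get? "answers").getD []).length : Int) + 2)).toList.length)).take (PySem.Int.toStr (((((PySem.Dict.mk question).get? "answers").getD []).length : Int) + 2)).toList.length)).getD 0 ≤ ((((PySem.Dict.mk question).get? "answers").getD []).length : Int) ∧
     ((PySem.Dict.mk (PySem.List.pyGetD (((PySem.Dict.mk question).get? "answers").getD [])
        ((PySem.Int.ofChars? (((pvPadded (PySem.Int.toStr (((((PySem.Dict.mk question).get? "answers").getD []).length : Int) + 2)).toList.length (PySem.Int.toStr number).toList).drop (i * (PySem.Int.toStr (((((PySem.Dict.mk question).get? "answers").getD []).length : Int) + 2)).toList.length)).take (PySem.Int.toStr (((((PySem.Dict.mk question).get? "answers").getD []).length : Int) + 2)).toList.length)).getD 0 - 1) [])).get? "value").isSome))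

instance (number : Int) (question : List (String × List (List (String × String)))) (withdrawals : List Int) : Decidable (Pre_parse_vote number question withdrawals) := by unfold Pre_parse_vote; infer_instance

def pvWitness_parse_vote : Int × (List (String × List (List (String × String)))) × List Int :=
  (12, [("answers", [[("value", "a")], [("value", "b")]])], [])

def Spec_parse_vote (number : Int) (question : List (String × List (List (String × String)))) (withdrawals : List Int) (out : List String) : Prop := out = parse_vote_alt number question withdrawals
instance (number : Int) (question : List (String × List (List (String × String)))) (withdrawals : List Int) (out : List String) : Decidable (Spec_parse_vote number question withdrawals out) := by unfold Spec_parse_vote; infer_instance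

-- ===== CLAIM (what is proved, stated in full; the proofs are below) =====
def Claim_equal_parse_vote : Prop := ∀ (number : Int) (question : List (String × List (List (String × String)))) (withdrawals : List Int), Dom_parse_vote number question withdrawals → Pre_parse_vote number question withdrawals → Spec_parse_vote number question withdrawals (parse_vote number question withdrawals)

-- ===== LEMMAS AND PROOFS =====

-- the value both programs contribute for one chunk
def pvF (answers : List (List (String × String))) (withdrawals : List Int) (c : List Char) : List String :=
  if withdrawals.contains ((PySem.Int.ofChars? c).getD 0 - 1) then []
  else if (PySem.Int.ofChars? c).getD 0 - 1 < 0 then []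
  else if (PySem.Int.ofChars? c).getD 0 - 1 < (answers.length : Int) then
    [(PySem.Dict.mk (PySem.List.pyGetD answers ((PySem.Int.ofChars? c).getD 0 - 1) [])).getD "value" ""]
  else []

def pvChunksFuel (t : Nat) : Nat → List Char → List (List Char)
  | 0, _ => []
  | _ + 1, [] => []
  | f + 1, c :: cs => (c :: cs).take t :: pvChunksFuel t f ((c :: cs).drop t)

def pvChunks (t : Nat) (s : List Char) : List (List Char) :=
  if t = 0 then [] else pvChunksFuel t s.length s

theorem pvChunksFuel_congr (t : Nat) (ht : t ≠ 0) : ∀ (f f' : Nat) (s : List Char),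
    s.length ≤ f → s.length ≤ f' → pvChunksFuel t f s = pvChunksFuel t f' s := by
  intro f
  induction f with
  | zero =>
    intro f' s hf hf'
    have : s = [] := List.eq_nil_of_length_eq_zero (by omega)
    subst this
    cases f' <;> rfl
  | succ f ih =>
    intro f' s hf hf'
    cases s with
    | nil => cases f' <;> rfl
    | cons c cs =>
      cases f' with
      | zero => simp at hf'
      | succ f' =>
        show (c :: cs).take t :: pvChunksFuel t f ((c :: cs).drop t)
            = (c :: cs).take t :: pvChunksFuel t f' ((c :: cs).drop t)
        congr 1
        apply ih
        · simp [List.length_drop] at hf ⊢; omega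
        · simp [List.length_drop] at hf' ⊢; omega

theorem pvChunks_nil (t : Nat) : pvChunks t [] = [] := by
  rw [pvChunks]
  split
  · rfl
  · rfl

theorem pvChunks_cons (t : Nat) (s : List Char) (hs : s ≠ []) (ht : t ≠ 0) :
    pvChunks t s = s.take t :: pvChunks t (s.drop t) := by
  rw [pvChunks, pvChunks, if_neg ht, if_neg ht]
  cases s with
  | nil => exact absurd rfl hs
  | cons c cs =>
    show (c :: cs).take t :: pvChunksFuel t cs.length ((c :: cs).drop t)
        = (c :: cs).take t :: pvChunksFuel t ((c :: cs).drop t).length ((c :: cs).drop t)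
    congr 1
    apply pvChunksFuel_congr t ht
    · simp [List.length_drop]; omega
    · simp [List.length_drop]

theorem pvChunks_append_last (t : Nat) (ht : 1 ≤ t) : ∀ (K : Nat) (s : List Char),
    s.length = (K + 1) * t →
      pvChunks t s = pvChunks t (s.take (K * t)) ++ [s.drop (K * t)] := by
  intro K
  induction K with
  | zero =>
    intro s hlen
    have hlen' : s.length = t := by omega
    have hs : s ≠ [] := by intro h; subst h; simp at hlen'; omega
    rw [pvChunks_cons t s hs (by omega)]
    simp only [Nat.zero_mul, List.take_zero, List.drop_zero, pvChunks_nil]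
    rw [List.take_of_length_le (by omega), List.drop_eq_nil_of_le (by omega), pvChunks_nil]
    simp
  | succ K ih =>
    intro s hlen
    have hs : s ≠ [] := by
      intro h; subst h; simp at hlen
      rcases hlen with h | h <;> omega
    have hKt : (K + 1) * t ≤ s.length := by nlinarith
    have h1 : s.take ((K + 1) * t) ≠ [] := by
      have hl : (s.take ((K + 1) * t)).length = (K + 1) * t := by
        simp [List.length_take]; omega
      intro h; rw [h] at hl; simp at hl; omega
    rw [pvChunks_cons t s hs (by omega), pvChunks_cons t _ h1 (by omega)]
    have e1 : List.take t (List.take ((K + 1) * t) s) = List.take t s := by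
      rw [List.take_take]
      congr 1
      have : t ≤ (K + 1) * t := Nat.le_mul_of_pos_left t (by omega)
      omega
    have e2 : List.drop t (List.take ((K + 1) * t) s) = List.take (K * t) (List.drop t s) := by
      rw [List.drop_take]; congr 1; ring_nf; omega
    have e3 : List.drop ((K + 1) * t) s = List.drop (K * t) (List.drop t s) := by
      rw [List.drop_drop]; congr 1; ring
    rw [e1, e2, e3]
    have := ih (s.drop t) (by simp only [List.length_drop, hlen]; ring_nf; omega)
    rw [this]
    simp

theorem pvChunks_mem (t : Nat) (ht : 1 ≤ t) : ∀ (K : Nat) (p : List Char),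
    p.length = K * t → ∀ c ∈ pvChunks t p, ∃ i, i < K ∧ c = (p.drop (i * t)).take t := by
  intro K
  induction K with
  | zero =>
    intro p hlen c hc
    have : p = [] := List.eq_nil_of_length_eq_zero (by omega)
    subst this
    rw [pvChunks_nil] at hc
    simp at hc
  | succ K ih =>
    intro p hlen c hc
    have hs : p ≠ [] := by
      intro h; subst h; simp at hlen
      rcases hlen with h | h <;> omega
    rw [pvChunks_cons t p hs (by omega)] at hc
    rcases List.mem_cons.mp hc with rfl | hc
    · exact ⟨0, by omega, by simp⟩
    · have hlen' : (p.drop t).length = K * t := by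
        simp only [List.length_drop, hlen]
        have : (K + 1) * t = K * t + t := by ring
        omega
      obtain ⟨i, hi, rfl⟩ := ih (p.drop t) hlen' c hc
      refine ⟨i + 1, by omega, ?_⟩
      rw [List.drop_drop]
      congr 2
      ring

theorem pvBLoop_eq (answers : List (List (String × String))) (t : Nat) (withdrawals : List Int)
    (ht : 1 ≤ t) : ∀ (K : Nat) (s : List Char) (ret : List String), s.length = K * t →
    (∀ c ∈ pvChunks t s,
      withdrawals.contains ((PySem.Int.ofChars? c).getD 0 - 1) = true ∨
      (0 ≤ (PySem.Int.ofChars? c).getD 0 - 1 ∧ (PySem.Int.ofChars? c).getD 0 - 1 < (answers.length : Int))) →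
    pvBLoop answers t withdrawals s ret = (pvChunks t s).flatMap (pvF answers withdrawals) ++ ret := by
  intro K
  induction K with
  | zero =>
    intro s ret hlen _
    have hs : s = [] := by
      have : s.length = 0 := by omega
      exact List.eq_nil_of_length_eq_zero this
    subst hs
    rw [pvBLoop]
    simp [pvChunks_nil]
  | succ K ih =>
    intro s ret hlen hgood
    have hs : s ≠ [] := by
      intro h; subst h; simp at hlen
      rcases hlen with h | h <;> omega
    have hKt : s.length - t = K * t := by
      have : (K + 1) * t = K * t + t := by ring
      omega
    have hcut : pvChunks t s = pvChunks t (s.take (K * t)) ++ [s.drop (K * t)] :=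
      pvChunks_append_last t ht K s hlen
    have hlast : s.drop (K * t) ∈ pvChunks t s := by rw [hcut]; simp
    have hslice1 : PySem.List.slice s (some (-(t : Int))) none = s.drop (K * t) := by
      rw [PySem.List.slice_from_neg_natCast s t (by omega), hKt]
    have hslice2 : PySem.List.slice s none (some (-(t : Int))) = s.take (K * t) := by
      rw [PySem.List.slice_to_neg_natCast s t (by omega), hKt]
    have htail : ∀ c ∈ pvChunks t (s.take (K * t)),
        withdrawals.contains ((PySem.Int.ofChars? c).getD 0 - 1) = true ∨
        (0 ≤ (PySem.Int.ofChars? c).getD 0 - 1 ∧ (PySem.Int.ofChars? c).getD 0 - 1 < (answers.length : Int)) := by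
      intro c hc; exact hgood c (by rw [hcut]; exact List.mem_append_left _ hc)
    have hlentake : (s.take (K * t)).length = K * t := by
      simp [List.length_take]
      have : (K + 1) * t = K * t + t := by ring
      omega
    rw [pvBLoop]
    rw [dif_neg hs]
    simp only [hslice1, hslice2]
    set v : Int := (PySem.Int.ofChars? (s.drop (K * t))).getD 0 - 1 with hv
    by_cases hw : withdrawals.contains v
    · rw [if_pos hw, ih (s.take (K * t)) ret hlentake htail, hcut]
      simp only [List.flatMap_append, List.flatMap_cons, List.flatMap_nil, List.append_nil]
      rw [pvF]
      simp only [← hv, hw]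
      simp
    · rw [if_neg hw]
      rcases hgood _ hlast with hg | hg
      · rw [← hv] at hg; exact absurd hg hw
      · rw [← hv] at hg
        rw [if_neg (by omega)]
        rw [ih (s.take (K * t)) _ hlentake htail, hcut]
        simp only [List.flatMap_append, List.flatMap_cons, List.flatMap_nil, List.append_nil]
        rw [pvF]
        simp only [← hv, hw]
        rw [if_neg (by simp [hw]), if_neg (by omega), if_pos (by omega)]
        simp

theorem pvAFold_eq (answers : List (List (String × String))) (t : Nat) (withdrawals : List Int)
    (ht : 1 ≤ t) : ∀ (K : Nat) (p : List Char) (acc : List String), p.length = K * t →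
    (List.range K).foldl
      (fun ret k => ret ++ pvF answers withdrawals ((p.drop (k * t)).take t)) acc
      = acc ++ (pvChunks t p).flatMap (pvF answers withdrawals) := by
  intro K
  induction K with
  | zero =>
    intro p acc hlen
    have hp : p = [] := List.eq_nil_of_length_eq_zero (by omega)
    subst hp
    simp [pvChunks_nil]
  | succ K ih =>
    intro p acc hlen
    have hKt : K * t + t = (K + 1) * t := by ring
    have hlentake : (p.take (K * t)).length = K * t := by
      simp [List.length_take]; omega
    rw [List.range_succ, List.foldl_append]
    have hbody : (List.range K).foldl
        (fun ret k => ret ++ pvF answers withdrawals ((p.drop (k * t)).take t)) acc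
        = (List.range K).foldl
        (fun ret k => ret ++ pvF answers withdrawals (((p.take (K * t)).drop (k * t)).take t)) acc := by
      apply PySem.List.foldl_congr_mem
      intro acc' k hk
      have hkK : k < K := List.mem_range.mp hk
      congr 2
      rw [List.drop_take]
      rw [List.take_take]
      congr 1
      have : t ≤ K * t - k * t := by
        have h1 : (k + 1) * t ≤ K * t := Nat.mul_le_mul_right t (by omega)
        have h2 : (k + 1) * t = k * t + t := by ring
        omega
      omega
    rw [hbody, ih (p.take (K * t)) acc hlentake]
    have hlastchunk : (p.drop (K * t)).take t = p.drop (K * t) := by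
      apply List.take_of_length_le
      simp [List.length_drop]
      omega
    rw [List.foldl_cons, List.foldl_nil, hlastchunk,
        pvChunks_append_last t ht K p hlen]
    simp [List.flatMap_append]

theorem pvToChars_nonneg (n : Int) (hn : 0 ≤ n) :
    (PySem.Int.toStr n).toList = Nat.toDigits 10 n.toNat := by
  rw [PySem.Int.toList_toStr, PySem.Int.toChars, if_neg (by omega)]

theorem pvToStr_len_pos (n : Int) : 1 ≤ (PySem.Int.toStr n).toList.length := by
  rw [PySem.Int.toList_toStr, PySem.Int.toChars]
  split
  · simp
  · exact Nat.length_toDigits_pos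

theorem pvCeilDiv (L t q r : Nat) (ht : 1 ≤ t) (hL : L = q * t + r) (hr : r < t) (hL1 : 1 ≤ L) :
    (L + t - 1) / t * t = if r = 0 then L else L + (t - r) := by
  have e1 : (q + 1) * t = q * t + t := by ring
  have e2 : (q + 1 + 1) * t = q * t + t + t := by ring
  by_cases h0 : r = 0
  · subst h0
    rw [if_pos rfl]
    have : (L + t - 1) / t = q := by
      apply Nat.div_eq_of_lt_le <;> omega
    rw [this]; omega
  · rw [if_neg h0]
    have : (L + t - 1) / t = q + 1 := by
      apply Nat.div_eq_of_lt_le <;> omega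
    rw [this]
    omega

theorem pvZfill_cons (c : Char) (rest : List Char) (w : Int)
    (hw : ¬ (w ≤ ((c :: rest : List Char).length : Int))) (hc : ¬(c = '+' ∨ c = '-')) :
    PySem.Chars.zfill (c :: rest) w
      = List.replicate (w.toNat - (c :: rest : List Char).length) '0' ++ (c :: rest) := by
  simp only [PySem.Chars.zfill.eq_def, if_neg hw]
  simp [hc]

theorem pvPad_eq (t : Nat) (ht : 1 ≤ t) (n : Int) (hn : 0 ≤ n) :
    PySem.Chars.zfill (PySem.Int.toStr n).toList
        ((((PySem.Int.toStr n).toList.length + t - 1) / t * t : Nat) : Int)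
      = pvPadded t (PySem.Int.toStr n).toList := by
  have hdig : ∀ c ∈ (PySem.Int.toStr n).toList, c.isDigit := by
    rw [pvToChars_nonneg n hn]
    intro c hc
    exact Nat.isDigit_of_mem_toDigits (by omega) (by omega) hc
  have hL1 : 1 ≤ (PySem.Int.toStr n).toList.length := pvToStr_len_pos n
  set s : List Char := (PySem.Int.toStr n).toList with hsdef
  set L : Nat := s.length with hLdef
  have hL : L = L / t * t + L % t := by
    have := Nat.div_add_mod L t
    have e : t * (L / t) = L / t * t := Nat.mul_comm _ _
    omega
  have hr : L % t < t := Nat.mod_lt _ (by omega)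
  rw [pvCeilDiv L t (L / t) (L % t) ht hL hr hL1]
  unfold pvPadded
  by_cases h0 : L % t = 0
  · rw [if_pos h0]
    rw [if_neg (by simp [← hLdef, h0])]
    rw [PySem.Chars.zfill.eq_def, if_pos (by omega)]
  · rw [if_neg h0]
    rw [if_pos (by simp [← hLdef, h0])]
    cases hsc : s with
    | nil => exfalso; rw [hsc] at hLdef; simp at hLdef; omega
    | cons c rest =>
      have hc : c.isDigit := hdig c (by rw [hsc]; simp)
      have hcne : ¬(c = '+' ∨ c = '-') := by
        rintro (rfl | rfl) <;> simp [Char.isDigit] at hc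
      have hlen2 : (c :: rest : List Char).length = L := by rw [← hsc, hLdef]
      rw [pvZfill_cons c rest _ (by rw [hlen2]; push_cast; omega) hcne]
      rw [← hsc]
      congr 1
      have h1 : ((L + (t - L % t) : Nat) : Int).toNat = L + (t - L % t) := by omega
      rw [h1]
      have h2 : (t - L % t) % t = t - L % t := Nat.mod_eq_of_lt (by omega)
      rw [h2]
      congr 1
      rw [hsc] at hLdef
      rw [hsc]
      simp at hLdef ⊢
      omega

theorem pvPadded_len_dvd (t : Nat) (ht : 1 ≤ t) (s : List Char) : t ∣ (pvPadded t s).length := by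
  unfold pvPadded
  have hL : s.length = s.length / t * t + s.length % t := by
    have := Nat.div_add_mod s.length t
    have e : t * (s.length / t) = s.length / t * t := Nat.mul_comm _ _
    omega
  by_cases h0 : s.length % t = 0
  · rw [if_neg (by omega)]
    exact Nat.dvd_of_mod_eq_zero h0
  · rw [if_pos (by omega)]
    simp only [List.length_append, List.length_replicate]
    have h2 : (t - s.length % t) % t = t - s.length % t :=
      Nat.mod_eq_of_lt (by have := Nat.mod_lt s.length (show 0 < t by omega); omega)
    refine ⟨s.length / t + 1, ?_⟩
    have e : t * (s.length / t + 1) = s.length / t * t + t := by ring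
    have := Nat.mod_lt s.length (show 0 < t by omega)
    omega

-- ===== VERDICT (by name: the statement is the Claim_ definition above) =====
theorem parse_vote_spec : Claim_equal_parse_vote := by
  unfold Claim_equal_parse_vote
  intro number question withdrawals _ hPre
  obtain ⟨hSome, hn, hChunks⟩ := hPre
  obtain ⟨answers, hAns⟩ := Option.isSome_iff_exists.mp hSome
  simp only [hAns, Option.getD_some] at hChunks
  unfold Spec_parse_vote parse_vote parse_vote_alt
  rw [hAns]
  dsimp only
  set t : Nat := (PySem.Int.toStr ((answers.length : Int) + 2)).toList.length with htdef
  set sL : List Char := (PySem.Int.toStr number).toList with hsdef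
  have ht : 1 ≤ t := pvToStr_len_pos _
  have hpad : (if sL.length % t ≠ 0 then
      List.replicate ((t - sL.length % t) % t) '0' ++ sL else sL) = pvPadded t sL := rfl
  rw [hpad, pvPad_eq t ht number hn]
  set p : List Char := pvPadded t sL with hpdef
  have hdvd : t ∣ p.length := pvPadded_len_dvd t ht sL
  have hK : p.length = p.length / t * t := (Nat.div_mul_cancel hdvd).symm
  rw [pvBLoop_eq answers t withdrawals ht (p.length / t) p [] hK ?good]
  case good =>
    intro c hc
    obtain ⟨i, hi, hceq⟩ := pvChunks_mem t ht (p.length / t) p hK c hc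
    subst hceq
    rcases hChunks i (List.mem_range.mpr hi) with hmem | ⟨h1, h2, _⟩
    · left
      exact List.elem_iff.mpr hmem
    · right
      omega
  rw [PySem.List.pyRange_one]
  have hcnt : ((((p.length / t : Nat) : Int) - 0)).toNat = p.length / t := by
    rw [Int.sub_zero, Int.toNat_natCast]
  rw [hcnt, List.foldl_map]
  refine Eq.trans (PySem.List.foldl_congr_mem _ _ (fun ret k =>
      ret ++ pvF answers withdrawals ((p.drop (k * t)).take t)) _ ?_) ?_
  · intro acc y hy
    have hsl : PySem.List.slice p (some ((0 + (y : Int)) * (t : Int)))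
        (some ((0 + (y : Int) + 1) * (t : Int))) = (p.drop (y * t)).take t := by
      have e1 : (0 + (y : Int)) * (t : Int) = ((y * t : Nat) : Int) := by push_cast; ring
      have e2 : (0 + (y : Int) + 1) * (t : Int) = (((y + 1) * t : Nat) : Int) := by push_cast; ring
      rw [e1, e2, PySem.List.slice_natCast]
      congr 1
      have e3 : (y + 1) * t = y * t + t := by ring
      omega
    simp only [hsl, pvF]
    split_ifs <;> simp
  · rw [pvAFold_eq answers t withdrawals ht (p.length / t) p [] hK]
    simp
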